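-- pv_equiv track=rewrite | github.com/daniel-reich/ubiquitous-fiesta | hQRuQguN4bKyM2gik_8.py | simple_check
-- ===== SOURCE A (Python) =====
-- def simple_check(a, b):
--   count = 0
--   while a != 0 or b != 0:
--     bigger_num = max(a, b)
--     smaller_num = min(a , b)
--     try:
--       if bigger_num % smaller_num == 0:
--         count += 1
--     except ZeroDivisionError:
--       break
--     a -= 1
--     b -= 1
--   return count
-- ===== SOURCE B (Python) =====
-- def simple_check(a, b):
--     m = min(a, b)
--     d = abs(a - b)
--     if d == 0:
--         return m
--     total = 0
--     i = 1
--     while i * i <= d: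
--         if d % i == 0:
--             if i <= m:
--                 total += 1
--             j = d // i
--             if j != i and j <= m:
--                 total += 1
--         i += 1
--     return total
-- ===== Notes on version B (the rewrite author's own statement) =====
-- stated objective: faster
-- what changed: B replaces A's simultaneous decrement loop over min(a,b) steps by a closed-form observation (the step with min value s counts iff s divides |a-b|) and enumerates divisors of d=|a-b| in pairs up to sqrt(d), returning min(a,b) directly when a=b; Pre_ excludes min(a,b)<0, where A loops forever.
import Mathlib
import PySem

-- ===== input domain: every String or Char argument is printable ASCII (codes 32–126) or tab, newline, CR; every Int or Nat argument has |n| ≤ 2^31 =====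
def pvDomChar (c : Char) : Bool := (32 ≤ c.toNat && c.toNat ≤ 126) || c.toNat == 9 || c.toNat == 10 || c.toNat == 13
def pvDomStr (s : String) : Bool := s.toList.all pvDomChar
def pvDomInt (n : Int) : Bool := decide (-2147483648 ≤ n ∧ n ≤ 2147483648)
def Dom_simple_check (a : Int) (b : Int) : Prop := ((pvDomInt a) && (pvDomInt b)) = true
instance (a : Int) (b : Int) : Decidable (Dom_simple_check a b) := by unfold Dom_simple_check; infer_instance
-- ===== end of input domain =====

-- B counts the divisors of |a-b| that are ≤ min(a,b), enumerating divisor pairs up to sqrt(|a-b|),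
-- instead of A's simultaneous-decrement loop (objective: faster).

-- ===== PORT A =====
-- fuel = (min a b).toNat + 1 iterations suffice on Pre_ (min a b decreases by 1 each step);
-- Python's 'except ZeroDivisionError: break' is the 'smaller_num = 0' early return.
def simpleCheckLoop (a b count : Int) : Nat → Int
  | 0 => count
  | fuel + 1 =>
    if a ≠ 0 ∨ b ≠ 0 then
      let bigger_num := max a b
      let smaller_num := min a b
      if smaller_num = 0 then count   -- Python: ZeroDivisionError → break
      else
        let count' := if PySem.Int.mod bigger_num smaller_num = 0 then count + 1 else count
        simpleCheckLoop (a - 1) (b - 1) count' fuel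
    else count

def simple_check (a : Int) (b : Int) : Int :=
  simpleCheckLoop a b 0 ((min a b).toNat + 1)

-- ===== PORT B =====
def simpleCheckAltLoop (d m : Int) (i : Int) (total : Int) : Int :=
  if h : i * i ≤ d then
    if PySem.Int.mod d i = 0 then
      let t1 := if i ≤ m then total + 1 else total
      let j := PySem.Int.floordiv d i
      let t2 := if j ≠ i ∧ j ≤ m then t1 + 1 else t1
      simpleCheckAltLoop d m (i + 1) t2
    else
      simpleCheckAltLoop d m (i + 1) total
  else total
termination_by (d + 1 - i).toNat
decreasing_by
  all_goals
    have h0 : 0 ≤ i * i := mul_self_nonneg i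
    have hi : i ≤ 0 ∨ i ≤ i * i := by
      by_cases h1 : i ≤ 0
      · exact Or.inl h1
      · exact Or.inr (le_mul_of_one_le_left (by omega) (by omega))
    omega

def simple_check_alt (a : Int) (b : Int) : Int :=
  let m := min a b
  let d := |a - b|
  if d = 0 then m
  else simpleCheckAltLoop d m 1 0

-- ===== PRECONDITION & SPEC =====
-- Pre_ excludes min(a,b) < 0: there A's loop decrements both arguments forever and never
-- returns (smaller_num is then negative and never reaches 0), so Pre_ is exactly where A returns.
def Pre_simple_check (a : Int) (b : Int) : Prop := 0 ≤ a ∧ 0 ≤ b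
instance (a : Int) (b : Int) : Decidable (Pre_simple_check a b) := by unfold Pre_simple_check; infer_instance
def pvWitness_simple_check : Int × Int := (12, 8)

def Spec_simple_check (a : Int) (b : Int) (out : Int) : Prop := out = simple_check_alt a b
instance (a : Int) (b : Int) (out : Int) : Decidable (Spec_simple_check a b out) := by unfold Spec_simple_check; infer_instance

-- ===== CLAIM (what is proved, stated in full; the proofs are below) =====
def Claim_equal_simple_check : Prop := ∀ (a : Int) (b : Int), Dom_simple_check a b → Pre_simple_check a b → Spec_simple_check a b (simple_check a b)

-- ===== LEMMAS AND PROOFS =====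

-- the common specification: the number of s with 1 ≤ s ≤ m dividing d
noncomputable def divCount (m d : Int) : Int :=
  (((Finset.Icc 1 m).filter (fun s => s ∣ d)).card : Int)

-- B-loop invariant: divisors s ≤ m of d not yet visited at counter i (min s (d/s) ≥ i)
noncomputable def remCount (d m i : Int) : Int :=
  (((Finset.Icc 1 d).filter (fun s => s ∣ d ∧ s ≤ m ∧ i ≤ min s (d / s))).card : Int)

theorem divCount_zero_d (m : Int) (hm : 0 ≤ m) : divCount m 0 = m := by
  unfold divCount
  rw [Finset.filter_true_of_mem (fun s _ => dvd_zero s), Int.card_Icc]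
  omega

theorem divCount_step (m d : Int) (hm : 1 ≤ m) :
    divCount m d = divCount (m - 1) d + (if m ∣ d then 1 else 0) := by
  unfold divCount
  have h : Finset.Icc (1:ℤ) m = insert m (Finset.Icc 1 (m - 1)) := by
    ext x; simp only [Finset.mem_Icc, Finset.mem_insert]; omega
  rw [h, Finset.filter_insert]
  split_ifs with h1
  · rw [Finset.card_insert_of_notMem]
    · push_cast; ring
    · simp only [Finset.mem_filter, Finset.mem_Icc]
      rintro ⟨⟨-, h2⟩, -⟩; omega
  · ring

theorem divCount_abs (m d : Int) : divCount m |d| = divCount m d := by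
  unfold divCount
  congr 1
  · exact congrArg Finset.card (by apply Finset.filter_congr; intro s _; simp [dvd_abs])

theorem remCount_empty (d m i : Int) (hi : 1 ≤ i) (h : d < i * i) : remCount d m i = 0 := by
  have he : (Finset.Icc 1 d).filter (fun s => s ∣ d ∧ s ≤ m ∧ i ≤ min s (d / s)) = ∅ := by
    apply Finset.filter_eq_empty_iff.mpr
    rintro s hs ⟨h1, h2, h3⟩
    have hs1 : 1 ≤ s := (Finset.mem_Icc.mp hs).1
    have h4 : i ≤ s := le_trans h3 (min_le_left _ _)
    have h5 : i ≤ d / s := le_trans h3 (min_le_right _ _)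
    have h6 : d / s * s = d := Int.ediv_mul_cancel h1
    nlinarith
  unfold remCount
  rw [he]
  simp

theorem remCount_step_ndvd (d m i : Int) (hd : 1 ≤ d) (hi : 1 ≤ i) (hnd : ¬ i ∣ d) :
    remCount d m i = remCount d m (i + 1) := by
  unfold remCount
  congr 1
  apply congrArg Finset.card
  apply Finset.filter_congr
  intro s hs
  have hs1 : 1 ≤ s := (Finset.mem_Icc.mp hs).1
  constructor
  · rintro ⟨h1, h2, h3⟩
    refine ⟨h1, h2, ?_⟩
    rcases lt_or_eq_of_le h3 with h4 | h4
    · omega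
    · exfalso
      rcases min_eq_iff.mp h4.symm with ⟨h5, -⟩ | ⟨h5, -⟩
      · exact hnd (h5 ▸ h1)
      · have h6 : s * (d / s) = d := Int.mul_ediv_cancel' h1
        exact hnd ⟨s, by rw [← h6, h5]; ring⟩
  · rintro ⟨h1, h2, h3⟩; exact ⟨h1, h2, by omega⟩

theorem remCount_step_dvd (d m i : Int) (hd : 1 ≤ d) (hi : 1 ≤ i) (hdv : i ∣ d) (hii : i * i ≤ d) :
    remCount d m i = remCount d m (i + 1)
      + (if i ≤ m then 1 else 0) + (if d / i ≠ i ∧ d / i ≤ m then 1 else 0) := by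
  have hj_mul : i * (d / i) = d := Int.mul_ediv_cancel' hdv
  set j := d / i with hj
  have hij : i ≤ j := by nlinarith
  have hj1 : 1 ≤ j := by omega
  have hjd : j ≤ d := by nlinarith
  have hid : i ≤ d := by nlinarith
  have hdj : d / j = i := by
    have hd_eq : d = j * i := by rw [← hj_mul]; ring
    rw [hd_eq]
    exact Int.mul_ediv_cancel_left _ (by omega)
  have hjdvd : j ∣ d := ⟨i, by rw [← hj_mul]; ring⟩
  have hsplit : (Finset.Icc 1 d).filter (fun s => s ∣ d ∧ s ≤ m ∧ i ≤ min s (d / s))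
      = (Finset.Icc 1 d).filter (fun s => s ∣ d ∧ s ≤ m ∧ i + 1 ≤ min s (d / s))
        ∪ (Finset.Icc 1 d).filter (fun s => s ∣ d ∧ s ≤ m ∧ min s (d / s) = i) := by
    ext s
    simp only [Finset.mem_filter, Finset.mem_union]
    constructor
    · rintro ⟨hs, h1, h2, h3⟩
      rcases lt_or_eq_of_le h3 with h4 | h4
      · exact Or.inl ⟨hs, h1, h2, by omega⟩
      · exact Or.inr ⟨hs, h1, h2, h4.symm⟩
    · rintro (⟨hs, h1, h2, h3⟩ | ⟨hs, h1, h2, h3⟩)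
      · exact ⟨hs, h1, h2, by omega⟩
      · exact ⟨hs, h1, h2, by omega⟩
  have hQ : (Finset.Icc 1 d).filter (fun s => s ∣ d ∧ s ≤ m ∧ min s (d / s) = i)
      = (if i ≤ m then ({i} : Finset Int) else ∅) ∪ (if j ≠ i ∧ j ≤ m then ({j} : Finset Int) else ∅) := by
    ext s
    simp only [Finset.mem_filter, Finset.mem_Icc, Finset.mem_union]
    constructor
    · rintro ⟨⟨hs1, hs2⟩, h1, h2, h3⟩
      have hcase : s = i ∨ d / s = i := by
        rcases min_eq_iff.mp h3 with ⟨h4, -⟩ | ⟨h4, -⟩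
        · exact Or.inl h4
        · exact Or.inr h4
      have hseq : s = i ∨ s = j := by
        rcases hcase with h4 | h4
        · exact Or.inl h4
        · have h5 : s * (d / s) = d := Int.mul_ediv_cancel' h1
          have h6 : s * i = d := by rw [← h5, h4]
          have h7 : i * s = i * j := by
            have h8 : i * s = d := by rw [mul_comm]; exact h6
            linarith [hj_mul]
          exact Or.inr (mul_left_cancel₀ (by omega : (i:ℤ) ≠ 0) h7)
      rcases hseq with rfl | rfl
      · left; rw [if_pos h2]; simp
      · by_cases hji : j = i
        · left; rw [if_pos (hji ▸ h2)]; simp [hji]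
        · right; rw [if_pos ⟨hji, h2⟩]; simp
    · rintro (hmem | hmem)
      · by_cases him : i ≤ m
        · rw [if_pos him] at hmem
          simp only [Finset.mem_singleton] at hmem
          subst hmem
          exact ⟨⟨hi, hid⟩, hdv, him, by rw [← hj]; exact min_eq_left hij⟩
        · rw [if_neg him] at hmem; simp at hmem
      · by_cases hjm : j ≠ i ∧ j ≤ m
        · rw [if_pos hjm] at hmem
          simp only [Finset.mem_singleton] at hmem
          subst hmem
          exact ⟨⟨hj1, hjd⟩, hjdvd, hjm.2, by rw [hdj]; exact min_eq_right hij⟩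
        · rw [if_neg hjm] at hmem; simp at hmem
  have hdisj : Disjoint ((Finset.Icc 1 d).filter (fun s => s ∣ d ∧ s ≤ m ∧ i + 1 ≤ min s (d / s)))
      ((Finset.Icc 1 d).filter (fun s => s ∣ d ∧ s ≤ m ∧ min s (d / s) = i)) := by
    rw [Finset.disjoint_left]
    rintro s hs1 hs2
    simp only [Finset.mem_filter] at hs1 hs2
    omega
  unfold remCount
  rw [hsplit, Finset.card_union_of_disjoint hdisj, hQ]
  have hcard : ((if i ≤ m then ({i} : Finset Int) else ∅) ∪ (if j ≠ i ∧ j ≤ m then ({j} : Finset Int) else ∅)).card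
      = (if i ≤ m then 1 else 0) + (if j ≠ i ∧ j ≤ m then 1 else 0) := by
    split_ifs with h1 h2 h2
    · rw [Finset.singleton_union, Finset.card_insert_of_notMem (by simp [Ne.symm h2.1]), Finset.card_singleton]
    · simp
    · simp
    · simp
  rw [hcard]
  push_cast
  ring

theorem remCount_one (d m : Int) (hd : 1 ≤ d) : remCount d m 1 = divCount m d := by
  unfold remCount divCount
  congr 1
  apply congrArg Finset.card
  ext s
  simp only [Finset.mem_filter, Finset.mem_Icc]
  constructor
  · rintro ⟨⟨h1, h2⟩, h3, h4, h5⟩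
    exact ⟨⟨h1, h4⟩, h3⟩
  · rintro ⟨⟨h1, h2⟩, h3⟩
    have hsd : s ≤ d := Int.le_of_dvd (by omega) h3
    have hds : 1 ≤ d / s := (Int.le_ediv_iff_mul_le (by omega)).mpr (by omega)
    exact ⟨⟨h1, hsd⟩, h3, h2, by omega⟩

theorem loopB_eq (d m : Int) (hd : 1 ≤ d) :
    ∀ (n : Nat) (i t : Int), 1 ≤ i → (d + 1 - i).toNat ≤ n →
      simpleCheckAltLoop d m i t = t + remCount d m i := by
  intro n
  induction n with
  | zero =>
    intro i t hi hn
    have hgt : d < i * i := by nlinarith [Int.toNat_eq_zero.mp (Nat.le_zero.mp hn)]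
    rw [simpleCheckAltLoop, dif_neg (by omega), remCount_empty d m i hi hgt]
    ring
  | succ n ih =>
    intro i t hi hn
    rw [simpleCheckAltLoop]
    by_cases h : i * i ≤ d
    · rw [dif_pos h]
      have hi1 : (1:Int) ≤ i + 1 := by omega
      have hn1 : (d + 1 - (i + 1)).toNat ≤ n := by omega
      by_cases hm0 : PySem.Int.mod d i = 0
      · have hdv : i ∣ d := (PySem.Int.mod_eq_zero_iff_dvd d i).mp hm0
        have hfd : PySem.Int.floordiv d i = d / i := PySem.Int.floordiv_eq_ediv_of_pos (by omega)
        simp only [if_pos hm0, hfd]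
        rw [ih (i + 1) _ hi1 hn1, remCount_step_dvd d m i hd hi hdv h]
        split_ifs <;> ring
      · simp only [if_neg hm0]
        have hnd : ¬ i ∣ d := fun hdvd => hm0 ((PySem.Int.mod_eq_zero_iff_dvd d i).mpr hdvd)
        rw [ih (i + 1) _ hi1 hn1, remCount_step_ndvd d m i hd hi hnd]
    · rw [dif_neg h, remCount_empty d m i hi (by omega)]
      ring

theorem loopA_eq : ∀ (fuel : Nat) (a b c : Int), 0 ≤ a → 0 ≤ b → (min a b).toNat < fuel →
    simpleCheckLoop a b c fuel = c + divCount (min a b) (a - b) := by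
  intro fuel
  induction fuel with
  | zero => intro a b c ha hb hf; omega
  | succ f ih =>
    intro a b c ha hb hf
    by_cases h0 : a ≠ 0 ∨ b ≠ 0
    · rw [simpleCheckLoop, if_pos h0]
      by_cases hm0 : min a b = 0
      · rw [if_pos hm0, hm0, divCount]
        rw [show Finset.Icc (1:ℤ) 0 = ∅ from Finset.Icc_eq_empty (by omega)]
        simp
      · have hm1 : 1 ≤ min a b := by omega
        have ha1 : 1 ≤ a := by omega
        have hb1 : 1 ≤ b := by omega
        simp only [if_neg hm0]
        have hmod : PySem.Int.mod (max a b) (min a b) = 0 ↔ (min a b) ∣ (a - b) := by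
          rw [PySem.Int.mod_eq_zero_iff_dvd]
          have hM : max a b - min a b = |a - b| := by
            rcases le_total a b with h | h
            · rw [max_eq_right h, min_eq_left h, abs_of_nonpos (by omega)]; ring
            · rw [max_eq_left h, min_eq_right h, abs_of_nonneg (by omega)]
          constructor
          · intro h
            have h2 : (min a b) ∣ (max a b - min a b) := dvd_sub h dvd_rfl
            rw [hM] at h2
            exact (dvd_abs _ _).mp h2
          · intro h
            have h2 : (min a b) ∣ |a - b| := (dvd_abs _ _).mpr h
            have h3 : (min a b) ∣ (max a b - min a b) := hM ▸ h2
            have := dvd_add h3 (dvd_refl (min a b))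
            rwa [sub_add_cancel] at this
        rw [ih (a - 1) (b - 1) _ (by omega) (by omega) (by omega)]
        rw [show min (a - 1) (b - 1) = min a b - 1 by omega,
            show a - 1 - (b - 1) = a - b by ring]
        rw [divCount_step (min a b) (a - b) hm1]
        by_cases hdvd : (min a b) ∣ (a - b)
        · rw [if_pos (hmod.mpr hdvd), if_pos hdvd]; ring
        · rw [if_neg (fun h => hdvd (hmod.mp h)), if_neg hdvd]; ring
    · rw [simpleCheckLoop, if_neg h0]
      push_neg at h0
      obtain ⟨h1, h2⟩ := h0
      subst h1; subst h2
      simp only [min_self, sub_self]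
      rw [divCount_zero_d 0 le_rfl]
      ring

-- ===== VERDICT (by name: the statement is the Claim_ definition above) =====
theorem simple_check_spec : Claim_equal_simple_check := by
  intro a b _hdom hpre
  obtain ⟨ha, hb⟩ := hpre
  unfold Spec_simple_check simple_check simple_check_alt
  rw [loopA_eq ((min a b).toNat + 1) a b 0 ha hb (by omega)]
  by_cases hab : |a - b| = 0
  · have heq : a = b := by have := abs_eq_zero.mp hab; omega
    subst heq
    rw [sub_self, min_self, divCount_zero_d a ha]
    simp
  · have hd : 1 ≤ |a - b| := by have := abs_nonneg (a - b); omega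
    simp only [if_neg hab]
    rw [loopB_eq |a - b| (min a b) hd (|a - b| + 1 - 1).toNat 1 0 le_rfl le_rfl]
    rw [remCount_one _ _ hd, divCount_abs]
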